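-- pv_equiv track=rewrite | github.com/phenominalcoder/sudoku | MRVPlus.py | FogResolver
-- ===== SOURCE A (Python) =====
-- def FogResolver(potential_cells_list, cells_candidates_list):
--     selected_cell = potential_cells_list[0]
--     max_contribution = 0
--     for potential_cell in potential_cells_list:
--         for number in potential_cell[2]:
--             contribution = 0
--             for cell in cells_candidates_list:
--                 contribution = contribution+len(set(potential_cell[2]).intersection(set(cell[2])))
--             if contribution > max_contribution:
--                 max_contribution = contribution
--                 selected_cell = potential_cell
--     return selected_cell
-- ===== SOURCE B (Python) =====
-- def FogResolver(potential_cells_list, cells_candidates_list):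
--     # freq[n] = number of cells in cells_candidates_list whose candidate set contains n
--     freq = {}
--     for cell in cells_candidates_list:
--         for n in set(cell[2]):
--             freq[n] = freq.get(n, 0) + 1
--     selected_cell = potential_cells_list[0]
--     max_contribution = 0
--     for p in potential_cells_list:
--         contribution = sum(freq.get(n, 0) for n in set(p[2]))
--         if contribution > max_contribution:
--             max_contribution = contribution
--             selected_cell = p
--     return selected_cell
-- ===== Notes on version B (the rewrite author's own statement) =====
-- stated objective: faster
-- what changed: Replaces A's triple-nested rescan (the same contribution recomputed once per candidate number, each time intersecting against every cell) by a one-pass frequency table over cells_candidates_list followed by a single linear scoring pass over potential_cells_list.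
import Mathlib
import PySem

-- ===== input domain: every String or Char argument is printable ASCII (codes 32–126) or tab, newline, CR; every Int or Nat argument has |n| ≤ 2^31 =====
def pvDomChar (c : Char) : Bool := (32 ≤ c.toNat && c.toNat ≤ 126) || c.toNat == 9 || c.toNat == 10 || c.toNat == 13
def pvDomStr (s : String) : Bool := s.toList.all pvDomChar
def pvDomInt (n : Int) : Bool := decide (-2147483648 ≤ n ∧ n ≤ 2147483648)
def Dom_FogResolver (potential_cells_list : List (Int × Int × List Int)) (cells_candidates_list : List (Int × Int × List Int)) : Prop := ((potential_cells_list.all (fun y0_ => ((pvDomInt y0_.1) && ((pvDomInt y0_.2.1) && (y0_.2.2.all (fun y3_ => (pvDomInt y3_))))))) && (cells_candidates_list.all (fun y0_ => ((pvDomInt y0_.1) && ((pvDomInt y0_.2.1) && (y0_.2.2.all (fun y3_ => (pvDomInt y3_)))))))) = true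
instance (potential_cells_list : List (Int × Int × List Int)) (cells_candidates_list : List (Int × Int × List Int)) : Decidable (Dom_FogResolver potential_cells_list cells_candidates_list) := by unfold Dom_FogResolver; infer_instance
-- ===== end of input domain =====

-- B builds a per-number frequency table once and scores each potential cell by a single sum, instead of A's repeated full intersection rescan.


-- ===== PORT A =====
def FogResolver (potential_cells_list : List (Int × Int × List Int)) (cells_candidates_list : List (Int × Int × List Int)) : Int × Int × List Int :=
  -- selected_cell = potential_cells_list[0]; outside Pre_ (empty list) Python raises IndexError, port returns a junk default
  let selected0 := (PySem.List.pyGet? potential_cells_list 0).getD (0, 0, [])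
  let st := potential_cells_list.foldl (fun st potential_cell =>
    potential_cell.2.2.foldl (fun st _number =>
      let contribution := cells_candidates_list.foldl (fun c cell =>
        c + PySem.Set.len (PySem.Set.inter (PySem.Set.ofList potential_cell.2.2) (PySem.Set.ofList cell.2.2))) (0 : Int)
      if contribution > st.2 then (potential_cell, contribution) else st) st)
    (selected0, (0 : Int))
  st.1

-- ===== PORT B =====
def FogResolver_alt (potential_cells_list : List (Int × Int × List Int)) (cells_candidates_list : List (Int × Int × List Int)) : Int × Int × List Int :=
  let freq : PySem.Dict Int Int := cells_candidates_list.foldl (fun d cell =>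
    (PySem.Set.ofList cell.2.2).foldl (fun d n => d.insert n (d.getD n 0 + 1)) d) PySem.Dict.empty
  let selected0 := (PySem.List.pyGet? potential_cells_list 0).getD (0, 0, [])
  let st := potential_cells_list.foldl (fun st p =>
    let contribution := ((PySem.Set.ofList p.2.2).map (fun n => freq.getD n 0)).sum
    if contribution > st.2 then (p, contribution) else st)
    (selected0, (0 : Int))
  st.1

-- ===== PRECONDITION & SPEC =====
-- Pre_ excludes only the empty potential_cells_list, on which A raises IndexError.
def Pre_FogResolver (potential_cells_list : List (Int × Int × List Int)) (cells_candidates_list : List (Int × Int × List Int)) : Prop := potential_cells_list ≠ []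
instance (potential_cells_list : List (Int × Int × List Int)) (cells_candidates_list : List (Int × Int × List Int)) : Decidable (Pre_FogResolver potential_cells_list cells_candidates_list) := by unfold Pre_FogResolver; infer_instance
def pvWitness_FogResolver : (List (Int × Int × List Int)) × (List (Int × Int × List Int)) := ([(0, 0, [1, 2]), (1, 1, [2, 3])], [(0, 1, [2]), (1, 0, [3, 1])])

def Spec_FogResolver (potential_cells_list : List (Int × Int × List Int)) (cells_candidates_list : List (Int × Int × List Int)) (out : Int × Int × List Int) : Prop := out = FogResolver_alt potential_cells_list cells_candidates_list
instance (potential_cells_list : List (Int × Int × List Int)) (cells_candidates_list : List (Int × Int × List Int)) (out : Int × Int × List Int) : Decidable (Spec_FogResolver potential_cells_list cells_candidates_list out) := by unfold Spec_FogResolver; infer_instance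

-- ===== CLAIM (what is proved, stated in full; the proofs are below) =====
def Claim_equal_FogResolver : Prop := ∀ (potential_cells_list : List (Int × Int × List Int)) (cells_candidates_list : List (Int × Int × List Int)), Dom_FogResolver potential_cells_list cells_candidates_list → Pre_FogResolver potential_cells_list cells_candidates_list → Spec_FogResolver potential_cells_list cells_candidates_list (FogResolver potential_cells_list cells_candidates_list)

-- ===== LEMMAS AND PROOFS =====

-- sum of a pointwise-sum map splits
theorem pvSumMapAdd {α : Type} (l : List α) (f g : α → Int) :
    (l.map (fun x => f x + g x)).sum = (l.map f).sum + (l.map g).sum := by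
  induction l with
  | nil => simp
  | cons x xs ih => simp [ih]; ring

-- getD after the insert-counting inner loop
theorem pvGetDInc (l : List Int) (d : PySem.Dict Int Int) (n : Int) :
    (l.foldl (fun d x => d.insert x (d.getD x 0 + 1)) d).getD n 0
      = d.getD n 0 + (l.count n : Int) := by
  induction l generalizing d with
  | nil => simp
  | cons x xs ih =>
    simp only [List.foldl_cons, ih, List.count_cons]
    by_cases hx : x = n
    · subst hx
      simp
      ring
    · simp [PySem.Dict.getD_insert, hx, Ne.symm hx]

-- the frequency dict counts, per number, the cells containing it
theorem pvFreqGetD (ccl : List (Int × Int × List Int)) (n : Int) (d : PySem.Dict Int Int) :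
    (ccl.foldl (fun d cell =>
        (PySem.Set.ofList cell.2.2).foldl (fun d n => d.insert n (d.getD n 0 + 1)) d) d).getD n 0
      = d.getD n 0 + (ccl.map (fun cell => if n ∈ cell.2.2 then (1 : Int) else 0)).sum := by
  induction ccl generalizing d with
  | nil => simp
  | cons c rest ih =>
    simp only [List.foldl_cons, ih, pvGetDInc, List.map_cons, List.sum_cons]
    have hcount : ((PySem.Set.ofList c.2.2).count n : Int) = if n ∈ c.2.2 then 1 else 0 := by
      by_cases hm : n ∈ c.2.2
      · rw [List.count_eq_one_of_mem (PySem.Set.nodup_ofList _) (by simp [hm])]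
        simp [hm]
      · rw [List.count_eq_zero_of_not_mem (by simp [hm])]
        simp [hm]
    rw [hcount]
    ring

-- per-cell intersection size as a sum of indicators over S
theorem pvInterLen (S : List Int) (l : List Int) :
    (S.map (fun n => if n ∈ l then (1 : Int) else 0)).sum
      = PySem.Set.len (PySem.Set.inter S (PySem.Set.ofList l)) := by
  induction S with
  | nil => simp [PySem.Set.inter, PySem.Set.len]
  | cons x xs ih =>
    by_cases hx : x ∈ l
    · simp only [List.map_cons, List.sum_cons, ih, PySem.Set.inter, PySem.Set.len] at *
      simp [hx, PySem.Set.contains]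
      try omega
    · simp only [List.map_cons, List.sum_cons, ih, PySem.Set.inter, PySem.Set.len] at *
      simp [hx, PySem.Set.contains]
      try omega

-- exchanging the two sums: per-number totals vs per-cell intersection sizes
theorem pvSwap (S : List Int) (ccl : List (Int × Int × List Int)) :
    (S.map (fun n => (ccl.map (fun cell => if n ∈ cell.2.2 then (1 : Int) else 0)).sum)).sum
      = (ccl.map (fun cell => PySem.Set.len (PySem.Set.inter S (PySem.Set.ofList cell.2.2)))).sum := by
  induction ccl with
  | nil => simp
  | cons c rest ih =>
    simp only [List.map_cons, List.sum_cons]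
    rw [pvSumMapAdd, ih, pvInterLen]

-- B's score of a cell equals A's contribution for that cell
theorem pvScoreEq (ccl : List (Int × Int × List Int)) (S : List Int) :
    ((S.map (fun n => ((ccl.foldl (fun d cell =>
        (PySem.Set.ofList cell.2.2).foldl (fun d n => d.insert n (d.getD n 0 + 1)) d)
        PySem.Dict.empty).getD n 0))).sum)
      = ccl.foldl (fun c cell =>
          c + PySem.Set.len (PySem.Set.inter S (PySem.Set.ofList cell.2.2))) 0 := by
  rw [PySem.List.foldl_add (l := ccl) (a := (0 : Int)) (g := fun cell : Int × Int × List Int => PySem.Set.len (PySem.Set.inter S (PySem.Set.ofList cell.2.2)))]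
  have h1 : (S.map (fun n => ((ccl.foldl (fun d cell =>
      (PySem.Set.ofList cell.2.2).foldl (fun d n => d.insert n (d.getD n 0 + 1)) d)
      PySem.Dict.empty).getD n 0))).sum
    = (S.map (fun n => (ccl.map (fun cell => if n ∈ cell.2.2 then (1 : Int) else 0)).sum)).sum := by
    congr 1
    apply List.map_congr_left
    intro n _
    rw [pvFreqGetD]
    simp
  rw [h1, pvSwap]
  omega

-- folding an idempotent state update over a nonempty list applies it once
theorem pvFoldIdem {α β : Type} (g : α → α) (hg : ∀ s, g (g s) = g s) (l : List β) (s : α) :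
    l.foldl (fun s _ => g s) (g s) = g s := by
  induction l generalizing s with
  | nil => rfl
  | cons x xs ih =>
    simp only [List.foldl_cons]
    rw [hg, ih]

-- intersection lengths are nonnegative, so contributions are nonnegative
theorem pvContribNonneg (ccl : List (Int × Int × List Int)) (S : List Int) :
    0 ≤ ccl.foldl (fun c cell =>
        c + PySem.Set.len (PySem.Set.inter S (PySem.Set.ofList cell.2.2))) 0 := by
  rw [PySem.List.foldl_add (l := ccl) (a := (0 : Int)) (g := fun cell : Int × Int × List Int => PySem.Set.len (PySem.Set.inter S (PySem.Set.ofList cell.2.2)))]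
  have : ∀ x ∈ ccl.map (fun cell => PySem.Set.len (PySem.Set.inter S (PySem.Set.ofList cell.2.2))), 0 ≤ x := by
    intro x hx
    simp only [List.mem_map] at hx
    obtain ⟨c, _, rfl⟩ := hx
    simp [PySem.Set.len]
  have := List.sum_nonneg this
  omega

-- the two selection loops agree from any state with nonnegative running max
theorem pvLoopEq (ccl : List (Int × Int × List Int)) (pcl : List (Int × Int × List Int))
    (st : (Int × Int × List Int) × Int) (hst : 0 ≤ st.2) :
    pcl.foldl (fun st potential_cell =>
      potential_cell.2.2.foldl (fun st _number =>
        let contribution := ccl.foldl (fun c cell =>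
          c + PySem.Set.len (PySem.Set.inter (PySem.Set.ofList potential_cell.2.2) (PySem.Set.ofList cell.2.2))) (0 : Int)
        if contribution > st.2 then (potential_cell, contribution) else st) st) st
    = pcl.foldl (fun st p =>
        let contribution := ((PySem.Set.ofList p.2.2).map (fun n =>
          (ccl.foldl (fun d cell =>
            (PySem.Set.ofList cell.2.2).foldl (fun d n => d.insert n (d.getD n 0 + 1)) d)
            PySem.Dict.empty).getD n 0)).sum
        if contribution > st.2 then (p, contribution) else st) st := by
  induction pcl generalizing st with
  | nil => rfl
  | cons p rest ih =>
    simp only [List.foldl_cons]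
    have hscore := pvScoreEq ccl (PySem.Set.ofList p.2.2)
    set cp := ccl.foldl (fun c cell =>
      c + PySem.Set.len (PySem.Set.inter (PySem.Set.ofList p.2.2) (PySem.Set.ofList cell.2.2))) (0 : Int) with hcp
    have hcpnn : 0 ≤ cp := pvContribNonneg ccl _
    have hstep : p.2.2.foldl (fun st _number =>
        if cp > st.2 then (p, cp) else st) st
       = (if ((PySem.Set.ofList p.2.2).map (fun n =>
            (ccl.foldl (fun d cell =>
              (PySem.Set.ofList cell.2.2).foldl (fun d n => d.insert n (d.getD n 0 + 1)) d)
              PySem.Dict.empty).getD n 0)).sum > st.2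
          then (p, ((PySem.Set.ofList p.2.2).map (fun n =>
            (ccl.foldl (fun d cell =>
              (PySem.Set.ofList cell.2.2).foldl (fun d n => d.insert n (d.getD n 0 + 1)) d)
              PySem.Dict.empty).getD n 0)).sum) else st) := by
      rw [hscore]
      cases hl : p.2.2 with
      | nil =>
        -- empty candidate list: A's inner loop never runs; B's contribution is 0, not > st.2
        have : cp = 0 := by rw [hcp, hl]; simp [PySem.Set.ofList, PySem.Set.inter, PySem.Set.len]
        simp only [List.foldl_nil, this]
        rw [if_neg (by omega)]
      | cons x xs =>
        have hg : ∀ s : (Int × Int × List Int) × Int,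
            (fun s => if cp > s.2 then (p, cp) else s) ((fun s => if cp > s.2 then (p, cp) else s) s)
              = (fun s => if cp > s.2 then (p, cp) else s) s := by
          intro s
          by_cases h : cp > s.2 <;> simp [h]
        simp only [List.foldl_cons]
        have := pvFoldIdem (fun s => if cp > s.2 then (p, cp) else s) hg xs st
        simpa using this
    rw [hstep]
    split
    next h => exact ih _ (by dsimp only; omega)
    next h => exact ih _ hst

-- ===== VERDICT (by name: the statement is the Claim_ definition above) =====
theorem FogResolver_spec : Claim_equal_FogResolver := by
  intro pcl ccl _ _
  unfold Spec_FogResolver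
  exact congrArg Prod.fst (pvLoopEq ccl pcl ((PySem.List.pyGet? pcl 0).getD (0, 0, []), 0) (by simp))
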